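-- pv_equiv track=rewrite | github.com/afzalsiddique/problem-solving | Problem_Solving_Python/leetcode/lc2078.py | maxDistance
-- ===== SOURCE A (Python) =====
-- import functools; import itertools; import math; import operator; import random; import string; from bisect import *; from collections import deque, defaultdict, Counter, OrderedDict; from functools import lru_cache, cache; from heapq import *; import unittest; from typing import List; from math import sqrt
--
-- def maxDistance(colors: List[int]) -> int:
--     n=len(colors)
--     maxx=0
--     for i in range(n):
--         for j in range(i+1,n):
--             if colors[i]!=colors[j]:
--                 maxx=max(maxx,j-i)
--     return maxx
-- ===== SOURCE B (Python) =====
-- def maxDistance(colors):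
--     n = len(colors)
--     if n == 0:
--         return 0
--     first, last = colors[0], colors[-1]
--     best = 0
--     for i, c in enumerate(colors):
--         if c != last:
--             best = max(best, n - 1 - i)
--         if c != first:
--             best = max(best, i)
--     return best
-- ===== Notes on version B (the rewrite author's own statement) =====
-- stated objective: faster
-- what changed: Replaced the all-pairs double loop with a single pass that compares each house only to the two endpoint houses (the optimal pair always involves an endpoint).
import Mathlib
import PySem

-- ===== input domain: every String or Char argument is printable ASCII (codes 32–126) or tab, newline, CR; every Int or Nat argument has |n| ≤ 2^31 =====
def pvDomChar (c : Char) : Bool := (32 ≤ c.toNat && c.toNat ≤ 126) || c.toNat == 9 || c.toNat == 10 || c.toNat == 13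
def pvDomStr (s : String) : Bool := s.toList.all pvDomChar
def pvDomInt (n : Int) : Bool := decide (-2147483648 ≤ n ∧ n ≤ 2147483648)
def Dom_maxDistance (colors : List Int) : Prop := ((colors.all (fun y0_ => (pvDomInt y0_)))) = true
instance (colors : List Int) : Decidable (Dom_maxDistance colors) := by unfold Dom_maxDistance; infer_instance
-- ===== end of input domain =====

-- B replaces A's all-pairs double loop by one pass comparing each house to the two endpoints.

-- ===== PORT A =====
-- colors[i]/colors[j] with i,j always in range; pyGetD's default 0 is never consulted.
def maxDistance (colors : List Int) : Int :=
  let n : Int := (colors.length : Int)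
  (PySem.List.pyRange 0 n 1).foldl (fun maxx i =>
    (PySem.List.pyRange (i + 1) n 1).foldl (fun m j =>
      if PySem.List.pyGetD colors i 0 ≠ PySem.List.pyGetD colors j 0 then max m (j - i)
      else m) maxx) 0

-- ===== PORT B =====
-- colors[0]/colors[-1] taken only when the list is nonempty; pyGetD's default 0 is never consulted.
def maxDistance_alt (colors : List Int) : Int :=
  let n : Int := (colors.length : Int)
  if n = 0 then 0
  else
    let first := PySem.List.pyGetD colors 0 0
    let last := PySem.List.pyGetD colors (-1) 0
    (PySem.List.enumerate colors).foldl (fun best p =>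
      let best := if p.2 ≠ last then max best (n - 1 - p.1) else best
      if p.2 ≠ first then max best p.1 else best) 0

-- ===== PRECONDITION & SPEC =====
def Spec_maxDistance (colors : List Int) (out : Int) : Prop := out = maxDistance_alt colors
instance (colors : List Int) (out : Int) : Decidable (Spec_maxDistance colors out) := by unfold Spec_maxDistance; infer_instance

-- ===== CLAIM (what is proved, stated in full; the proofs are below) =====
def Claim_equal_maxDistance : Prop := ∀ (colors : List Int), Dom_maxDistance colors → Spec_maxDistance colors (maxDistance colors)

-- ===== LEMMAS AND PROOFS =====

-- the inner loop of A, as a named function (definitionally the inner foldl of the port)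
def innerA (colors : List Int) (n i m : Int) : Int :=
  (PySem.List.pyRange (i + 1) n 1).foldl (fun m j =>
    if PySem.List.pyGetD colors i 0 ≠ PySem.List.pyGetD colors j 0 then max m (j - i)
    else m) m

-- the loop body of B (definitionally the foldl step of the port)
def stepB (n first last : Int) (best : Int) (p : Int × Int) : Int :=
  let best := if p.2 ≠ last then max best (n - 1 - p.1) else best
  if p.2 ≠ first then max best p.1 else best

-- ---- generic facts about a guarded running max  foldl (fun m x => if P x then max m (f x) else m) ----

theorem gmax_init_le {α : Type} (P : α → Prop) [DecidablePred P] (f : α → Int) :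
    ∀ (l : List α) (a : Int), a ≤ l.foldl (fun m x => if P x then max m (f x) else m) a := by
  intro l
  induction l with
  | nil => intro a; simp
  | cons x l ih =>
      intro a
      refine le_trans ?_ (ih _)
      by_cases h : P x <;> simp [h]

theorem gmax_ub {α : Type} (P : α → Prop) [DecidablePred P] (f : α → Int) :
    ∀ (l : List α) (a : Int) (x : α), x ∈ l → P x →
      f x ≤ l.foldl (fun m x => if P x then max m (f x) else m) a := by
  intro l
  induction l with
  | nil => intro a x hx; cases hx
  | cons y l ih =>
      intro a x hx hP
      rcases List.mem_cons.mp hx with rfl | hx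
      · refine le_trans ?_ (gmax_init_le P f l _)
        simp [hP]
      · exact ih _ _ hx hP

theorem gmax_cases {α : Type} (P : α → Prop) [DecidablePred P] (f : α → Int) :
    ∀ (l : List α) (a : Int),
      l.foldl (fun m x => if P x then max m (f x) else m) a = a ∨
      ∃ x ∈ l, P x ∧ l.foldl (fun m x => if P x then max m (f x) else m) a = f x := by
  intro l
  induction l with
  | nil => intro a; left; rfl
  | cons y l ih =>
      intro a
      simp only [List.foldl_cons]
      rcases ih (if P y then max a (f y) else a) with h | ⟨x, hx, hP, h⟩
      · by_cases hy : P y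
        · rcases le_total (f y) a with hle | hle
          · left; simp [hy, max_eq_left hle] at h; simpa [hy, max_eq_left hle] using h
          · right; exact ⟨y, List.mem_cons_self .., hy, by simpa [hy, max_eq_right hle] using h⟩
        · left; simpa [hy] using h
      · right; exact ⟨x, List.mem_cons_of_mem _ hx, hP, h⟩

-- ---- facts about A's outer loop ----

theorem outerA_init_le (colors : List Int) (n : Int) :
    ∀ (l : List Int) (a : Int), a ≤ l.foldl (fun m i => innerA colors n i m) a := by
  intro l
  induction l with
  | nil => intro a; simp
  | cons i l ih =>
      intro a
      exact le_trans (gmax_init_le _ _ _ a) (ih _)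

theorem outerA_ub (colors : List Int) (n : Int) :
    ∀ (l : List Int) (a i j : Int), i ∈ l → i + 1 ≤ j → j < n →
      PySem.List.pyGetD colors i 0 ≠ PySem.List.pyGetD colors j 0 →
      j - i ≤ l.foldl (fun m i => innerA colors n i m) a := by
  intro l
  induction l with
  | nil => intro a i j hi; cases hi
  | cons k l ih =>
      intro a i j hi hij hjn hne
      rcases List.mem_cons.mp hi with rfl | hi
      · refine le_trans ?_ (outerA_init_le colors n l _)
        exact gmax_ub _ _ _ a j ((PySem.List.mem_pyRange_one).mpr ⟨hij, hjn⟩) hne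
      · exact ih _ _ _ hi hij hjn hne

theorem outerA_cases (colors : List Int) (n : Int) :
    ∀ (l : List Int) (a : Int),
      l.foldl (fun m i => innerA colors n i m) a = a ∨
      ∃ i ∈ l, ∃ j, i + 1 ≤ j ∧ j < n ∧
        PySem.List.pyGetD colors i 0 ≠ PySem.List.pyGetD colors j 0 ∧
        l.foldl (fun m i => innerA colors n i m) a = j - i := by
  intro l
  induction l with
  | nil => intro a; left; rfl
  | cons k l ih =>
      intro a
      simp only [List.foldl_cons]
      rcases ih (innerA colors n k a) with h | ⟨i, hi, j, h1, h2, h3, h4⟩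
      · rcases gmax_cases (fun j => PySem.List.pyGetD colors k 0 ≠ PySem.List.pyGetD colors j 0)
          (fun j => j - k) (PySem.List.pyRange (k + 1) n 1) a with h' | ⟨j, hj, hP, h'⟩
        · left; rw [h]; exact h'
        · right
          obtain ⟨hj1, hj2⟩ := (PySem.List.mem_pyRange_one).mp hj
          exact ⟨k, List.mem_cons_self .., j, hj1, hj2, hP, by rw [h]; exact h'⟩
      · right; exact ⟨i, List.mem_cons_of_mem _ hi, j, h1, h2, h3, h4⟩

-- ---- facts about B's loop ----

theorem stepB_init_le (n first last b : Int) (p : Int × Int) : b ≤ stepB n first last b p := by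
  unfold stepB; dsimp only; split_ifs <;> simp

theorem foldB_init_le (n first last : Int) :
    ∀ (l : List (Int × Int)) (a : Int), a ≤ l.foldl (stepB n first last) a := by
  intro l
  induction l with
  | nil => intro a; simp
  | cons p l ih => intro a; exact le_trans (stepB_init_le n first last a p) (ih _)

theorem foldB_ub_last (n first last : Int) :
    ∀ (l : List (Int × Int)) (a : Int) (p : Int × Int), p ∈ l → p.2 ≠ last →
      n - 1 - p.1 ≤ l.foldl (stepB n first last) a := by
  intro l
  induction l with
  | nil => intro a p hp; cases hp
  | cons q l ih =>
      intro a p hp hne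
      rcases List.mem_cons.mp hp with rfl | hp
      · refine le_trans ?_ (foldB_init_le n first last l _)
        unfold stepB; dsimp only; split_ifs <;> simp_all
      · exact ih _ _ hp hne

theorem foldB_ub_first (n first last : Int) :
    ∀ (l : List (Int × Int)) (a : Int) (p : Int × Int), p ∈ l → p.2 ≠ first →
      p.1 ≤ l.foldl (stepB n first last) a := by
  intro l
  induction l with
  | nil => intro a p hp; cases hp
  | cons q l ih =>
      intro a p hp hne
      rcases List.mem_cons.mp hp with rfl | hp
      · refine le_trans ?_ (foldB_init_le n first last l _)
        unfold stepB; dsimp only; split_ifs <;> simp_all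
      · exact ih _ _ hp hne

theorem stepB_cases (n first last b : Int) (p : Int × Int) :
    stepB n first last b p = b ∨
    (p.2 ≠ last ∧ stepB n first last b p = n - 1 - p.1) ∨
    (p.2 ≠ first ∧ stepB n first last b p = p.1) := by
  unfold stepB; dsimp only
  by_cases h1 : p.2 ≠ last <;> by_cases h2 : p.2 ≠ first <;> simp [h1, h2] <;> omega

theorem foldB_cases (n first last : Int) :
    ∀ (l : List (Int × Int)) (a : Int),
      l.foldl (stepB n first last) a = a ∨
      ∃ p ∈ l, (p.2 ≠ last ∧ l.foldl (stepB n first last) a = n - 1 - p.1) ∨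
               (p.2 ≠ first ∧ l.foldl (stepB n first last) a = p.1) := by
  intro l
  induction l with
  | nil => intro a; left; rfl
  | cons q l ih =>
      intro a
      simp only [List.foldl_cons]
      rcases ih (stepB n first last a q) with h | ⟨p, hp, hcase⟩
      · rcases stepB_cases n first last a q with h' | h'
        · left; rw [h, h']
        · right; exact ⟨q, List.mem_cons_self .., by rw [h]; exact h'⟩
      · right; exact ⟨p, List.mem_cons_of_mem _ hp, hcase⟩

-- A's result, in the named-helper form
theorem maxDistance_def (colors : List Int) :
    maxDistance colors =
      (PySem.List.pyRange 0 (colors.length : Int) 1).foldl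
        (fun m i => innerA colors (colors.length : Int) i m) 0 := rfl

-- B's result on a nonempty list, in the named-helper form
theorem maxDistance_alt_def (colors : List Int) (h : colors ≠ []) :
    maxDistance_alt colors =
      (PySem.List.enumerate colors).foldl
        (stepB (colors.length : Int) (PySem.List.pyGetD colors 0 0) (PySem.List.pyGetD colors (-1) 0)) 0 := by
  have hn : (colors.length : Int) ≠ 0 := by
    simpa using (fun hl => h (List.length_eq_zero_iff.mp hl))
  simp only [maxDistance_alt, if_neg hn]
  rfl

-- the main equivalence
theorem maxDistance_eq (colors : List Int) : maxDistance colors = maxDistance_alt colors := by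
  rcases List.eq_nil_or_concat colors with rfl | ⟨_, _, hcc⟩
  · rfl
  have h : colors ≠ [] := by rintro rfl; simp at hcc
  clear hcc
  have hlen : 0 < colors.length := List.length_pos_iff.mpr h
  have hfirst : PySem.List.pyGetD colors 0 0 = colors[0]'hlen := by
    rw [PySem.List.pyGetD_eq_getElem colors (0:Int) le_rfl (by exact_mod_cast hlen)]; simp
  have hlast : PySem.List.pyGetD colors (-1) 0 = colors[colors.length - 1]'(by omega) := by
    exact PySem.List.pyGetD_neg_natCast colors 1 0 one_pos (by omega)
  rw [maxDistance_def, maxDistance_alt_def colors h, hfirst, hlast]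
  obtain ⟨n, hn⟩ : ∃ m : Int, (colors.length : Int) = m := ⟨_, rfl⟩
  rw [hn]
  -- membership of (k, colors[k]) in enumerate colors
  have hmem : ∀ (k : Nat) (hk : k < colors.length),
      ((k : Int), colors[k]'hk) ∈ PySem.List.enumerate colors := by
    intro k hk
    exact (PySem.List.mem_enumerate_iff colors 0 _).mpr ⟨k, hk, by simp⟩
  refine le_antisymm ?_ ?_
  · -- A ≤ B
    rcases outerA_cases colors n (PySem.List.pyRange 0 n 1) 0 with hA | ⟨i, hi, j, hij, hjn, hcol, hA⟩
    · rw [hA]; exact foldB_init_le _ _ _ _ 0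
    rw [hA]
    obtain ⟨hi0, hin⟩ := (PySem.List.mem_pyRange_one).mp hi
    have hj0 : (0:Int) ≤ j := by omega
    rw [PySem.List.pyGetD_eq_getElem colors (0:Int) hi0 (by omega),
        PySem.List.pyGetD_eq_getElem colors (0:Int) hj0 (by omega)] at hcol
    by_cases hci : colors[i.toNat]'(by omega) = colors[colors.length - 1]'(by omega)
    · by_cases hcj : colors[j.toNat]'(by omega) = colors[0]'hlen
      · -- the two endpoints themselves carry different colors
        have hfl : colors[0]'hlen ≠ colors[colors.length - 1]'(by omega) := by
          intro hEq; exact hcol (by rw [hci, hcj]; exact hEq.symm)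
        have hub := foldB_ub_last n (colors[0]'hlen) (colors[colors.length - 1]'(by omega))
          (PySem.List.enumerate colors) 0 ((0 : Int), colors[0]'hlen)
          (by simpa using hmem 0 hlen) hfl
        simp only at hub
        exact le_trans (by omega : j - i ≤ n - 1 - 0) hub
      · have hub := foldB_ub_first n (colors[0]'hlen) (colors[colors.length - 1]'(by omega))
          (PySem.List.enumerate colors) 0 ((j.toNat : Int), colors[j.toNat]'(by omega))
          (hmem j.toNat (by omega)) hcj
        simp only at hub
        exact le_trans (by omega : j - i ≤ (j.toNat : Int)) hub
    · have hub := foldB_ub_last n (colors[0]'hlen) (colors[colors.length - 1]'(by omega))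
        (PySem.List.enumerate colors) 0 ((i.toNat : Int), colors[i.toNat]'(by omega))
        (hmem i.toNat (by omega)) hci
      simp only at hub
      exact le_trans (by omega : j - i ≤ n - 1 - (i.toNat : Int)) hub
  · -- B ≤ A
    rcases foldB_cases n (colors[0]'hlen) (colors[colors.length - 1]'(by omega))
        (PySem.List.enumerate colors) 0 with hB | ⟨p, hp, hcase⟩
    · rw [hB]; exact outerA_init_le colors n _ 0
    obtain ⟨k, hk, rfl⟩ := (PySem.List.mem_enumerate_iff colors 0 _).mp hp
    simp only [zero_add] at hcase
    rcases hcase with ⟨hne2, hB⟩ | ⟨hne2, hB⟩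
    · -- colors[k] differs from the last house: the pair (k, n-1) realises the gap
      have hkne : k ≠ colors.length - 1 := by
        intro hEq; exact hne2 (by simp [hEq])
      have hub := outerA_ub colors n (PySem.List.pyRange 0 n 1) 0 (k : Int) (n - 1)
        ((PySem.List.mem_pyRange_one).mpr ⟨by omega, by omega⟩) (by omega) (by omega)
        (by
          rw [PySem.List.pyGetD_eq_getElem colors (0:Int) (by omega) (by omega),
              PySem.List.pyGetD_eq_getElem colors (0:Int) (by omega) (by omega)]
          have h1 : ((k:Int)).toNat = k := by omega
          have h2 : (n - 1).toNat = colors.length - 1 := by omega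
          simp only [h1, h2]
          exact hne2)
      rw [hB]
      exact le_trans (le_of_eq (by omega)) hub
    · -- colors[k] differs from the first house: the pair (0, k) realises the gap
      have hkne : k ≠ 0 := by
        intro hEq; exact hne2 (by simp [hEq])
      have hub := outerA_ub colors n (PySem.List.pyRange 0 n 1) 0 0 (k : Int)
        ((PySem.List.mem_pyRange_one).mpr ⟨le_rfl, by omega⟩) (by omega) (by omega)
        (by
          rw [PySem.List.pyGetD_eq_getElem colors (0:Int) le_rfl (by omega),
              PySem.List.pyGetD_eq_getElem colors (0:Int) (by omega) (by omega)]
          have h1 : ((k:Int)).toNat = k := by omega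
          have h2 : ((0:Int)).toNat = 0 := rfl
          simp only [h1, h2]
          exact fun hEq => hne2 hEq.symm)
      rw [hB]
      exact le_trans (le_of_eq (by omega)) hub

-- ===== VERDICT (by name: the statement is the Claim_ definition above) =====
theorem maxDistance_spec : Claim_equal_maxDistance := by
  intro colors _
  exact maxDistance_eq colors
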